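-- pv_equiv track=rewrite | github.com/asavoullis/python_selflearning_examples | examples_and_tasks1.py | count_even_in_list
-- ===== SOURCE A (Python) =====
-- def count_even_in_list(inputlist):
--     sumofeven = 0
--     count = 0
--     # loop over the elements in the list
--     for x in inputlist:
--         # if that element when divided by 2 has a remainder of 0 (its even)
--         if x % 2 == 0:
--             # add one to the count
--             count += 1
--             # add the square of that number to the sum
--             sumofeven = sumofeven + x ** 2
--     return count, sumofeven
-- ===== SOURCE B (Python) =====
-- def count_even_in_list(inputlist):
--     # divide and conquer: split the list in half, solve each half, add the results
--     def go(seg):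
--         if len(seg) <= 1:
--             if seg and seg[0] % 2 == 0:
--                 return (1, seg[0] ** 2)
--             return (0, 0)
--         mid = len(seg) // 2
--         c1, s1 = go(seg[:mid])
--         c2, s2 = go(seg[mid:])
--         return (c1 + c2, s1 + s2)
--     return go(inputlist)
-- ===== Notes on version B (the rewrite author's own statement) =====
-- stated objective: alternative
-- what changed: Replaces A's single fused accumulation loop with a divide-and-conquer recursion that splits the list in half, solves each half independently and adds the (count, sum-of-squares) pairs, correct because both quantities are additive under concatenation.
import Mathlib
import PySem

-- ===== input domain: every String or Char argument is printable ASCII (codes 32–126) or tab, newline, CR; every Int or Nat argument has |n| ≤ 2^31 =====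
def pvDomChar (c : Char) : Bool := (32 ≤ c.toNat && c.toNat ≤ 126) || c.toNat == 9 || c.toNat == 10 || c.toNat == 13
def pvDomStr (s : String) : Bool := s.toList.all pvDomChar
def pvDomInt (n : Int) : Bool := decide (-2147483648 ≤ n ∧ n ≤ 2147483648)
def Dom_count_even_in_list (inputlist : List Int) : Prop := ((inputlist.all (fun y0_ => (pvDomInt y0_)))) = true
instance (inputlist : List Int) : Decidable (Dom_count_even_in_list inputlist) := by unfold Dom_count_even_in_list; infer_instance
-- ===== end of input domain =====

-- B replaces A's fused accumulation loop with a divide-and-conquer recursion on list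
-- halves (additive combine); an alternative structure of similar cost, not faster.


-- ===== PORT A =====
-- fused loop: one pass maintaining (count, sumofeven)
def count_even_in_list (inputlist : List Int) : Int × Int :=
  let st := inputlist.foldl
    (fun (acc : Int × Int) x =>
      if PySem.Int.mod x 2 = 0 then (acc.1 + 1, acc.2 + x ^ 2) else acc)
    (0, 0)
  (st.1, st.2)

-- ===== PORT B =====
-- Source B's `go`: split the segment in half, recurse on each half, add the two pairs.
-- seg[:mid] / seg[mid:] are take/drop for 0 ≤ mid ≤ len; the fuel argument (the
-- segment's length bounds the recursion depth comfortably) only makes the same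
-- computation structurally terminating, it changes no value.
def ceGo : Nat → List Int → Int × Int
  | 0, _ => (0, 0)
  | Nat.succ fuel, seg =>
    if seg.length ≤ 1 then
      match seg with
      | [] => (0, 0)
      | x :: _ => if PySem.Int.mod x 2 = 0 then (1, x ^ 2) else (0, 0)
    else
      let mid := seg.length / 2
      let p1 := ceGo fuel (seg.take mid)
      let p2 := ceGo fuel (seg.drop mid)
      (p1.1 + p2.1, p1.2 + p2.2)

def count_even_in_list_alt (inputlist : List Int) : Int × Int :=
  ceGo inputlist.length inputlist

-- ===== PRECONDITION & SPEC =====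
def Spec_count_even_in_list (inputlist : List Int) (out : Int × Int) : Prop := out = count_even_in_list_alt inputlist
instance (inputlist : List Int) (out : Int × Int) : Decidable (Spec_count_even_in_list inputlist out) := by unfold Spec_count_even_in_list; infer_instance

-- ===== CLAIM =====
def Claim_equal_count_even_in_list : Prop := ∀ (inputlist : List Int), Dom_count_even_in_list inputlist → Spec_count_even_in_list inputlist (count_even_in_list inputlist)

-- ===== LEMMAS AND PROOFS =====
-- canonical description of the answer
def ceSpec (l : List Int) : Int × Int :=
  (((l.filter (fun x => PySem.Int.mod x 2 = 0)).length : Int),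
   ((l.filter (fun x => PySem.Int.mod x 2 = 0)).map (fun x => x ^ 2)).sum)

theorem count_even_fold_eq (l : List Int) (c s : Int) :
    l.foldl
      (fun (acc : Int × Int) x =>
        if PySem.Int.mod x 2 = 0 then (acc.1 + 1, acc.2 + x ^ 2) else acc)
      (c, s)
    = (c + (ceSpec l).1, s + (ceSpec l).2) := by
  induction l generalizing c s with
  | nil => simp [ceSpec]
  | cons x xs ih =>
    simp only [List.foldl_cons, ceSpec, List.filter_cons]
    by_cases h : PySem.Int.mod x 2 = 0
    · rw [if_pos h, if_pos (by simpa using h), ih]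
      simp only [ceSpec, List.length_cons, List.map_cons, List.sum_cons, Prod.mk.injEq]
      constructor
      · push_cast; ring
      · ring
    · rw [if_neg h, if_neg (by simpa using h), ih]
      simp [ceSpec]

theorem ceSpec_append (a b : List Int) :
    ceSpec (a ++ b) = ((ceSpec a).1 + (ceSpec b).1, (ceSpec a).2 + (ceSpec b).2) := by
  simp [ceSpec]

theorem ceGo_eq (fuel : Nat) : ∀ l : List Int, l.length ≤ fuel → ceGo fuel l = ceSpec l := by
  induction fuel with
  | zero =>
    intro l hl
    have : l = [] := by cases l <;> simp_all
    subst this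
    simp [ceGo, ceSpec]
  | succ n ih =>
    intro l hl
    rw [show ceGo (n+1) l = (if l.length ≤ 1 then match l with | [] => ((0:Int), (0:Int)) | x :: _ => if PySem.Int.mod x 2 = 0 then (1, x ^ 2) else (0, 0) else let mid := l.length / 2; let p1 := ceGo n (l.take mid); let p2 := ceGo n (l.drop mid); (p1.1 + p2.1, p1.2 + p2.2)) from rfl]
    by_cases h : l.length ≤ 1
    · rw [if_pos h]
      match l with
      | [] => simp [ceSpec]
      | [x] =>
        by_cases hx : PySem.Int.mod x 2 = 0
        · have hd : (2:Int) ∣ x := by simpa using hx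
          simp [ceSpec, hd]
        · have hd : ¬ (2:Int) ∣ x := by simpa using hx
          simp [ceSpec, hd]
      | x :: y :: rest => simp at h
    · rw [if_neg h]
      have e1 := ih (l.take (l.length / 2)) (by simp at hl ⊢; omega)
      have e2 := ih (l.drop (l.length / 2)) (by simp at hl ⊢; omega)
      have h2 := ceSpec_append (l.take (l.length / 2)) (l.drop (l.length / 2))
      rw [List.take_append_drop] at h2
      simp only [e1, e2, h2]

-- ===== VERDICT =====
theorem count_even_in_list_spec : Claim_equal_count_even_in_list := by
  intro l _
  unfold Spec_count_even_in_list count_even_in_list count_even_in_list_alt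
  rw [count_even_fold_eq, ceGo_eq l.length l le_rfl]
  simp
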